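-- pv_equiv track=rewrite | github.com/kyungmin1221/CodingTest | 백준/Bronze/2775. 부녀회장이 될테야/부녀회장이 될테야.py | association
-- ===== SOURCE A (Python) =====
-- def association(k, n):
--     floor = []
--     for i in range(1, n + 1):  # 1 2 3
--         floor.append(i)  # [1,2,3]
--
--     for _ in range(k):
--         for i in range(1, n):  # 1 2
--             floor[i] += floor[i - 1]
--
--     return floor[-1]
-- ===== SOURCE B (Python) =====
-- def association(k, n):
--     # people in room n of floor k = C(n+k, k+1), computed as an exact
--     # rising-factorial product (each partial product is itself a binomial,
--     # so the floor division is exact)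
--     r = 1
--     for i in range(1, k + 2):
--         r = r * (n - 1 + i) // i
--     return r
-- ===== Notes on version B (the rewrite author's own statement) =====
-- stated objective: faster
-- what changed: Replaces the k-fold in-place prefix-sum over a length-n list by the closed-form binomial coefficient C(n+k, k+1), computed as an exact rising-factorial product of k+1 factors.
-- outside the precondition, e.g. on association(-2, 3): A returns 3, B returns 1
import Mathlib
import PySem

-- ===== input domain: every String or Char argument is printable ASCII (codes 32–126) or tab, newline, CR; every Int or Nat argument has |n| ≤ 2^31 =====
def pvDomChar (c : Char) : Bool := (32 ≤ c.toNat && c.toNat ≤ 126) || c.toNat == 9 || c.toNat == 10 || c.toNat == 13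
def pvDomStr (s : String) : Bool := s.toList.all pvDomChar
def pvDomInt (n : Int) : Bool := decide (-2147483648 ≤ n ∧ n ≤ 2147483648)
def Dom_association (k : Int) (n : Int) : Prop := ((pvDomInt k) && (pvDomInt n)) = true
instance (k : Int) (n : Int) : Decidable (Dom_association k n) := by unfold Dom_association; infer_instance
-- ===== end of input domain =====

-- B replaces A's k passes of in-place prefix sums over a length-n list by the
-- closed-form binomial C(n+k, k+1), computed as an exact product of k+1 factors (objective: faster).

-- ===== PORT A =====
-- floor[i] += floor[i-1]; the loop only visits indices 1 ≤ i < len(floor), where pyGetD/pySetD are exact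
def pvStepA (fl : List Int) (i : Int) : List Int :=
  PySem.List.pySetD fl i (PySem.List.pyGetD fl i 0 + PySem.List.pyGetD fl (i - 1) 0)

-- for i in range(1, n): floor[i] += floor[i-1]
def pvPassA (n : Int) (fl : List Int) : List Int :=
  (PySem.List.pyRange 1 n 1).foldl pvStepA fl

def association (k : Int) (n : Int) : Int :=
  -- floor = []; for i in range(1, n+1): floor.append(i)
  let floor0 := (PySem.List.pyRange 1 (n + 1) 1).foldl (fun acc i => acc ++ [i]) []
  -- for _ in range(k): (inner pass)
  let floorK := (PySem.List.pyRange 0 k 1).foldl (fun fl _ => pvPassA n fl) floor0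
  -- return floor[-1]  (in range exactly when n ≥ 1, guaranteed by Pre_)
  PySem.List.pyGetD floorK (-1) 0

-- ===== PORT B =====
def association_alt (k : Int) (n : Int) : Int :=
  (PySem.List.pyRange 1 (k + 2) 1).foldl
    (fun r i => PySem.Int.floordiv (r * (n - 1 + i)) i) 1

-- ===== PRECONDITION & SPEC =====
-- Pre_ requires 1 ≤ n (for n ≤ 0 the Python A raises IndexError on floor[-1]) and 0 ≤ k:
-- a negative floor count is outside the task's natural domain; A's value there (the untouched n,
-- since the loop body never runs) is an accident of range(), as defensible as any other.
def Pre_association (k : Int) (n : Int) : Prop := 0 ≤ k ∧ 1 ≤ n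
instance (k : Int) (n : Int) : Decidable (Pre_association k n) := by unfold Pre_association; infer_instance

def pvWitness_association : Int × Int := (2, 3)

def Spec_association (k : Int) (n : Int) (out : Int) : Prop := out = association_alt k n
instance (k : Int) (n : Int) (out : Int) : Decidable (Spec_association k n out) := by unfold Spec_association; infer_instance

-- ===== CLAIM (what is proved, stated in full; the proofs are below) =====
def Claim_equal_association : Prop := ∀ (k : Int) (n : Int), Dom_association k n → Pre_association k n → Spec_association k n (association k n)

-- ===== LEMMAS AND PROOFS =====

-- the in-place prefix-sum pass, functionally: running sum c, each cell becomes (cell + c)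
def pvScan : Int → List Int → List Int
  | _, [] => []
  | c, a :: t => (a + c) :: pvScan (a + c) t

theorem pvScan_eq_map (l : List Int) : ∀ c : Int,
    pvScan c l = (List.range l.length).map (fun i => c + ((l.take (i + 1)).sum)) := by
  induction l with
  | nil => intro c; rfl
  | cons a t ih =>
    intro c
    simp only [pvScan, ih (a + c), List.length_cons, List.range_succ_eq_map, List.map_cons,
      List.map_map]
    refine List.cons_eq_cons.mpr ⟨by simp [add_comm], ?_⟩
    apply List.map_congr_left
    intro i _
    simp only [Function.comp_apply, Nat.succ_eq_add_one, List.take_succ_cons, List.sum_cons]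
    ring

theorem pass_fold (s : List Int) : ∀ (p : List Int) (c : Int), p.getLast? = some c →
    (PySem.List.pyRange (p.length : Int) ((p.length + s.length : Nat) : Int) 1).foldl pvStepA (p ++ s)
      = p ++ pvScan c s := by
  induction s with
  | nil =>
    intro p c _
    have h : ((p.length + ([] : List Int).length : Nat) : Int) ≤ (p.length : Int) := by simp
    rw [PySem.List.pyRange_one_eq_nil h]
    simp [pvScan]
  | cons a t ih =>
    intro p c hc
    have hp : p ≠ [] := by rintro rfl; simp at hc
    have hL : 0 < p.length := List.length_pos_iff.mpr hp
    rw [PySem.List.pyRange_one_cons (by simp)]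
    rw [List.foldl_cons]
    have hstep : pvStepA (p ++ a :: t) (p.length : Int) = p ++ (a + c) :: t := by
      unfold pvStepA
      have h1 : PySem.List.pyGetD (p ++ a :: t) (p.length : Int) 0 = a := by
        rw [PySem.List.pyGetD_natCast]
        simp [List.getD]
      have h2 : PySem.List.pyGetD (p ++ a :: t) ((p.length : Int) - 1) 0 = c := by
        have : (p.length : Int) - 1 = ((p.length - 1 : Nat) : Int) := by omega
        rw [this, PySem.List.pyGetD_natCast]
        rw [List.getD, List.getElem?_append_left (by omega)]
        rw [← List.getLast?_eq_getElem?] at *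
        simp [hc]
      rw [h1, h2, PySem.List.pySetD_natCast]
      rw [List.set_append_right _ _ (Nat.le_refl _)]
      simp
    rw [hstep]
    have hrw : p ++ (a + c) :: t = (p ++ [a + c]) ++ t := by simp
    rw [hrw]
    have hIH := ih (p ++ [a + c]) (a + c) (by simp)
    have e2 : ((p ++ [a + c]).length + t.length : Nat) = p.length + (a :: t).length := by
      simp; omega
    have e1 : ((p ++ [a + c]).length : Int) = (p.length : Int) + 1 := by simp
    rw [e2, e1] at hIH
    rw [hIH]
    simp [pvScan]

theorem pvPassA_cons (a : Int) (t : List Int) :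
    pvPassA ((t.length + 1 : Nat) : Int) (a :: t) = a :: pvScan a t := by
  unfold pvPassA
  have := pass_fold t [a] a (by simp)
  simpa [add_comm] using this

theorem foldl_const_iterate {α γ : Type} (l : List γ) (f : α → α) (x : α) :
    l.foldl (fun a _ => f a) x = f^[l.length] x := by
  induction l generalizing x with
  | nil => rfl
  | cons h t ih => simp [List.foldl, ih, Function.iterate_succ_apply]

theorem hockey (j : Nat) : ∀ t : Nat,
    (((List.range t).map (fun m => ((Nat.choose (m + j + 1) (j + 1) : Nat) : Int))).sum)
      = (Nat.choose (t + j + 1) (j + 2) : Int) := by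
  intro t
  induction t with
  | zero => simp
  | succ s ih =>
    rw [List.range_succ, List.map_append, List.sum_append, ih]
    simp only [List.map_cons, List.map_nil, List.sum_cons, List.sum_nil, add_zero]
    have : (s + 1) + j + 1 = (s + j + 1) + 1 := by omega
    rw [this, Nat.choose_succ_succ (s + j + 1) (j + 1)]
    push_cast; ring

theorem pass_map (N : Nat) (hN : 1 ≤ N) (f : Nat → Int) :
    pvPassA (N : Int) ((List.range N).map f)
      = (List.range N).map (fun i => (((List.range (i + 1)).map f).sum)) := by
  obtain ⟨s, rfl⟩ : ∃ s, N = s + 1 := ⟨N - 1, by omega⟩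
  rw [List.range_succ_eq_map, List.map_cons]
  have hcast : ((s + 1 : Nat) : Int) = (((List.map f (List.map Nat.succ (List.range s))).length + 1 : Nat) : Int) := by
    simp
  rw [hcast, pvPassA_cons, pvScan_eq_map]
  simp only [List.length_map, List.length_range, List.map_map]
  refine List.cons_eq_cons.mpr ⟨by simp, ?_⟩
  rw [List.map_map]
  apply List.map_congr_left
  intro i hi
  have hmin : min (i + 1) s = i + 1 := by simp at hi; omega
  have htr : List.take (i + 1) (List.range s) = List.range (i + 1) := by
    rw [List.take_range, hmin]
  simp [← List.map_take, htr, List.range_succ_eq_map, List.map_map, Function.comp_def]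

theorem iter_pass (N : Nat) (hN : 1 ≤ N) : ∀ j : Nat,
    (pvPassA (N : Int))^[j] ((List.range N).map (fun m : Nat => ((m : Int) + 1)))
      = (List.range N).map (fun m => ((Nat.choose (m + j + 1) (j + 1) : Nat) : Int)) := by
  intro j
  induction j with
  | zero =>
    simp only [Function.iterate_zero_apply]
    apply List.map_congr_left; intro m _
    simp [Nat.choose_one_right]
  | succ j ih =>
    rw [Function.iterate_succ_apply', ih, pass_map N hN]
    apply List.map_congr_left; intro i _
    have hh := hockey j (i + 1)
    rw [hh]
    congr 2
    omega

theorem A_closed (K N : Nat) (hN : 1 ≤ N) :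
    association (K : Int) (N : Int) = (Nat.choose (N + K) (K + 1) : Int) := by
  unfold association
  dsimp only
  rw [PySem.List.foldl_append_singleton_eq_self, List.nil_append]
  have h0 : PySem.List.pyRange 1 ((N : Int) + 1) 1 = (List.range N).map (fun m : Nat => ((m : Int) + 1)) := by
    rw [PySem.List.pyRange_one]
    have : ((N : Int) + 1 - 1).toNat = N := by omega
    rw [this]
    apply List.map_congr_left; intro m _; ring
  rw [h0, foldl_const_iterate, PySem.List.length_pyRange_one]
  have : ((K : Int) - 0).toNat = K := by omega
  rw [this, iter_pass N hN K]
  have hne : (List.range N).map (fun m => ((Nat.choose (m + K + 1) (K + 1) : Nat) : Int)) ≠ [] := by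
    simp; omega
  rw [PySem.List.pyGetD_neg_one _ _ hne, List.getLast_eq_getElem]
  simp only [List.length_map, List.length_range, List.getElem_map, List.getElem_range]
  congr 2
  omega

theorem B_fold (N : Nat) (hN : 1 ≤ N) : ∀ j : Nat,
    (PySem.List.pyRange 1 ((j : Int) + 1) 1).foldl
      (fun r i => PySem.Int.floordiv (r * ((N : Int) - 1 + i)) i) 1
      = (Nat.choose (N - 1 + j) j : Nat) := by
  intro j
  induction j with
  | zero =>
    rw [show ((0 : Nat) : Int) + 1 = 1 from by norm_num, PySem.List.pyRange_one_eq_nil le_rfl]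
    simp
  | succ j ih =>
    rw [show (((j + 1 : Nat)) : Int) + 1 = ((j : Int) + 1) + 1 from by push_cast; ring,
      PySem.List.pyRange_one_succ_right (by omega), List.foldl_append, ih]
    simp only [List.foldl_cons, List.foldl_nil]
    have harg : (N : Int) - 1 + ((j : Int) + 1) = ((N + j : Nat) : Int) := by push_cast; omega
    rw [harg]
    have hmul : (Nat.choose (N - 1 + j) j) * (N + j) = Nat.choose (N + j) (j + 1) * (j + 1) := by
      have := Nat.add_one_mul_choose_eq (N - 1 + j) j
      have e1 : N - 1 + j + 1 = N + j := by omega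
      rw [e1] at this
      rw [mul_comm]
      exact this
    have : ((Nat.choose (N - 1 + j) j : Nat) : Int) * ((N + j : Nat) : Int)
        = ((Nat.choose (N + j) (j + 1) * (j + 1) : Nat) : Int) := by
      rw [← Nat.cast_mul, hmul]
    rw [this, show ((j : Int) + 1) = ((j + 1 : Nat) : Int) from by push_cast; ring,
      PySem.Int.floordiv_natCast]
    rw [Nat.mul_div_cancel _ (by omega)]
    have e3 : N - 1 + (j + 1) = N + j := by omega
    rw [e3]

theorem B_closed (K N : Nat) (hN : 1 ≤ N) :
    association_alt (K : Int) (N : Int) = (Nat.choose (N + K) (K + 1) : Int) := by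
  unfold association_alt
  rw [show (K : Int) + 2 = ((K + 1 : Nat) : Int) + 1 from by push_cast; ring, B_fold N hN (K + 1)]
  congr 2
  omega

-- ===== VERDICT (by name: the statement is the Claim_ definition above) =====
theorem association_spec : Claim_equal_association := by
  intro k n _ hpre
  obtain ⟨hk, hn⟩ := hpre
  unfold Spec_association
  obtain ⟨K, rfl⟩ : ∃ K : Nat, k = (K : Int) := ⟨k.toNat, (Int.toNat_of_nonneg hk).symm⟩
  obtain ⟨N, rfl⟩ : ∃ N : Nat, n = (N : Int) := ⟨n.toNat, (Int.toNat_of_nonneg (by omega)).symm⟩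
  have hN : 1 ≤ N := by exact_mod_cast hn
  rw [A_closed K N hN, B_closed K N hN]
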